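-- pv_equiv track=rewrite | github.com/simmarum/AdventOfCode | 2016/day-08/main.py | shift_column
-- ===== SOURCE A (Python) =====
-- def shift_column(d, a, b):
--     d = [list(i) for i in zip(*d)]
--     shift_map = list(range(len(d[0])))
--     x = shift_map.pop()
--     shift_map.insert(0, x)
--     for _ in range(b):
--         d = [[row[i] for i in shift_map] if ri ==
--              a else row for ri, row in enumerate(d)]
--     d = [list(i) for i in zip(*d)]
--     return d
-- ===== SOURCE B (Python) =====
-- def shift_column(d, a, b):
--     h = len(d)
--     s = b % h
--     return [[d[(i - s) % h][c] if c == a else v for c, v in enumerate(row)]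
--             for i, row in enumerate(d)]
-- ===== Notes on version B (the rewrite author's own statement) =====
-- stated objective: faster
-- what changed: A transposes the grid twice with zip(*d) and applies a one-step rotation of row a of the transpose b times; B does no transposition and no loop over b: one comprehension pass writes every cell, reading column-a cells from their modular source row (i - b%h) % h. Pre_ excludes the empty grid and all-empty-row grids (A raises IndexError) and ragged grids, where zip(*d)'s silent truncation of every row to the shortest row is an implementation artefact of A and B's direct indexing can raise IndexError; …
-- outside the precondition, e.g. on shift_column([[1, 2], [3]], 0, 1): A returns [[3], [1]], B returns [[3, 2], [1]]; on shift_column([[1, 2], [3]], 1, 1): A returns [[1], [3]], B raises IndexError; on shift_column([[1], [2]], 0, -1): A returns [[1], [2]], B returns [[2], [1]]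
import Mathlib
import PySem

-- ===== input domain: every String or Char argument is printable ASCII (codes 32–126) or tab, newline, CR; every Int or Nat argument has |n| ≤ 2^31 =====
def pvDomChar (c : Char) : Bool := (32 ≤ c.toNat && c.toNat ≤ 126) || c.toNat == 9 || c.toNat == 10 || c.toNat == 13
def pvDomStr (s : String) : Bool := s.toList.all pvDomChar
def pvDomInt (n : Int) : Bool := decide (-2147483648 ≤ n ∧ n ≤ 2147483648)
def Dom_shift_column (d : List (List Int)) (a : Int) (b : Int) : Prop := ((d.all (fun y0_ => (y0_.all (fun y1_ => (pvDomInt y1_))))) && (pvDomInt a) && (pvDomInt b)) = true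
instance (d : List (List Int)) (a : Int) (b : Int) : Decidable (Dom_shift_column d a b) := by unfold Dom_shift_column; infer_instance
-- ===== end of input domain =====

-- B replaces A's b-fold repetition of a one-step column rotation (between two zip-transposes)
-- by a single pass writing each cell, column-a cells from their modular source row: O(H·W) instead of O(b·H·W).

-- ===== PORT A =====
-- helper: list(zip(*d)) rows as lists (Python zip truncates at the shortest row)
def pyZipT (d : List (List Int)) : List (List Int) :=
  if h : d = [] ∨ d.any List.isEmpty then []
  else (d.map fun r => r.headD 0) :: pyZipT (d.map List.tail)
termination_by (d.map List.length).sum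
decreasing_by
  simp only [List.map_subtype, List.unattach_attach]
  rw [not_or] at h
  obtain ⟨hne, hall⟩ := h
  have hall' : ∀ r ∈ d, r ≠ [] := by
    intro r hr hrnil
    exact hall (List.any_eq_true.mpr ⟨r, hr, by simp [hrnil]⟩)
  have key : ∀ t : List (List Int), ((t.map List.tail).map List.length).sum ≤ (t.map List.length).sum := by
    intro t
    induction t with
    | nil => simp
    | cons r rest ih =>
      simp only [List.map_cons, List.sum_cons]
      have : r.tail.length ≤ r.length := by simp [List.length_tail]
      omega
  cases d with
  | nil => exact absurd rfl hne
  | cons r rest =>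
    have hr : r ≠ [] := hall' r (by simp)
    have h1 : r.tail.length < r.length := by
      cases r with
      | nil => exact absurd rfl hr
      | cons x xs => simp
    have h2 := key rest
    simp only [List.map_cons, List.sum_cons]
    omega

def shift_column (d : List (List Int)) (a : Int) (b : Int) : List (List Int) :=
  let t := pyZipT d
  let n := PySem.List.len (PySem.List.pyGetD t 0 [])   -- len(d[0]); IndexError when t = [] (excluded by Pre_)
  let sm0 := PySem.List.pyRange 0 n
  match PySem.List.pop? sm0 with                        -- x = shift_map.pop(); IndexError on [] (excluded by Pre_)
  | none => []
  | some (x, rest) =>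
    let sm := PySem.List.insert rest 0 x
    let t2 := (PySem.List.pyRange 0 b).foldl
      (fun g _ => (PySem.List.enumerate g).map
        (fun p => if p.1 == a then sm.map (fun i => PySem.List.pyGetD p.2 i 0) else p.2)) t
    pyZipT t2

-- ===== PORT B =====
def shift_column_alt (d : List (List Int)) (a : Int) (b : Int) : List (List Int) :=
  let h := PySem.List.len d                             -- b % 0 raises when d = [] (excluded by Pre_)
  let s := PySem.Int.mod b h
  (PySem.List.enumerate d).map (fun p =>
    (PySem.List.enumerate p.2).map (fun q =>
      if q.1 == a then PySem.List.pyGetD (PySem.List.pyGetD d (PySem.Int.mod (p.1 - s) h) []) q.1 0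
      else q.2))                                        -- the two indexings are in range on rectangular grids (Pre_)

-- ===== PRECONDITION & SPEC =====
-- Pre_ excludes: the empty grid and all-empty-row grids (A raises IndexError; B would raise ZeroDivisionError
-- on []); ragged grids, where zip(*d)'s silent truncation of every row to the shortest row is an
-- implementation artefact of A and B's direct indexing can raise IndexError; and negative b that actually
-- shifts an in-range column (b < 0, b % h ≠ 0, 0 ≤ a < width), an unspecified corner where A's empty
-- range(b) leaves the grid unchanged while B applies the modular rotation — either value is defensible.
def Pre_shift_column (d : List (List Int)) (a : Int) (b : Int) : Prop :=
  d ≠ [] ∧ (∀ r ∈ d, r.length = (d.headD []).length) ∧ d.headD [] ≠ [] ∧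
    (0 ≤ b ∨ PySem.Int.mod b (PySem.List.len d) = 0 ∨ a < 0 ∨ ((d.headD []).length : Int) ≤ a)
instance (d : List (List Int)) (a : Int) (b : Int) : Decidable (Pre_shift_column d a b) := by
  unfold Pre_shift_column; infer_instance

def pvWitness_shift_column : List (List Int) × Int × Int := ([[1, 2], [3, 4]], 0, 1)

def Spec_shift_column (d : List (List Int)) (a : Int) (b : Int) (out : List (List Int)) : Prop := out = shift_column_alt d a b
instance (d : List (List Int)) (a : Int) (b : Int) (out : List (List Int)) : Decidable (Spec_shift_column d a b out) := by unfold Spec_shift_column; infer_instance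

-- ===== CLAIM (what is proved, stated in full; the proofs are below) =====
def Claim_equal_shift_column : Prop := ∀ (d : List (List Int)) (a : Int) (b : Int), Dom_shift_column d a b → Pre_shift_column d a b → Spec_shift_column d a b (shift_column d a b)

-- ===== LEMMAS AND PROOFS =====

-- min of the row lengths (the width zip(*d) truncates to), as a Nat
def minw (d : List (List Int)) : Nat :=
  match d with
  | [] => 0
  | r :: rest => rest.foldl (fun m s => min m s.length) r.length

-- column m of the grid, as A's transpose produces it
def pvCol (d : List (List Int)) (m : Nat) : List Int := d.map (fun r => r.getD m 0)

-- column c rotated down k times (length n)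
def pvRotN (c : List Int) (n k : Nat) : List Int :=
  (List.range n).map (fun j => c.getD ((j + (n - 1) * k) % n) 0)

lemma foldl_min_len_le (t : List (List Int)) (a : Nat) :
    t.foldl (fun m s => min m s.length) a ≤ a ∧
      ∀ r ∈ t, t.foldl (fun m s => min m s.length) a ≤ r.length := by
  induction t generalizing a with
  | nil => simp
  | cons s rest ih =>
    obtain ⟨h1, h2⟩ := ih (min a s.length)
    refine ⟨le_trans h1 (by omega), ?_⟩
    intro r hr
    rcases List.mem_cons.mp hr with rfl | hr'
    · exact le_trans h1 (by omega)
    · exact h2 r hr'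

lemma le_foldl_min_len (t : List (List Int)) (a n : Nat) (h1 : n ≤ a)
    (h2 : ∀ r ∈ t, n ≤ r.length) : n ≤ t.foldl (fun m s => min m s.length) a := by
  induction t generalizing a with
  | nil => simpa
  | cons s rest ih =>
    simp only [List.foldl_cons]
    exact ih _ (le_min h1 (h2 s (by simp))) (fun r hr => h2 r (by simp [hr]))

lemma minw_le (d : List (List Int)) (r : List Int) (hr : r ∈ d) : minw d ≤ r.length := by
  cases d with
  | nil => cases hr
  | cons r0 rest =>
    rcases List.mem_cons.mp hr with rfl | hr'
    · exact (foldl_min_len_le rest r.length).1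
    · exact (foldl_min_len_le rest r0.length).2 r hr'

lemma le_minw (d : List (List Int)) (n : Nat) (hne : d ≠ [])
    (h : ∀ r ∈ d, n ≤ r.length) : n ≤ minw d := by
  cases d with
  | nil => exact absurd rfl hne
  | cons r0 rest =>
    exact le_foldl_min_len rest r0.length n (h r0 (by simp)) (fun r hr => h r (by simp [hr]))

lemma foldl_min_len_tail (t : List (List Int)) (a : Nat) :
    (t.map List.tail).foldl (fun m s => min m s.length) (a - 1)
      = t.foldl (fun m s => min m s.length) a - 1 := by
  induction t generalizing a with
  | nil => simp
  | cons s rest ih =>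
    simp only [List.map_cons, List.foldl_cons]
    have h : min (a - 1) s.tail.length = min a s.length - 1 := by
      simp only [List.length_tail]; omega
    rw [h, ih]

lemma minw_tail (d : List (List Int)) (hne : d ≠ []) :
    minw (d.map List.tail) = minw d - 1 := by
  cases d with
  | nil => exact absurd rfl hne
  | cons s rest =>
    show (rest.map List.tail).foldl (fun m s => min m s.length) s.tail.length = _
    have h : s.tail.length = s.length - 1 := by simp [List.length_tail]
    rw [h, foldl_min_len_tail]
    rfl

lemma getD_tail (r : List Int) (i : Nat) : r.tail.getD i 0 = r.getD (i + 1) 0 := by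
  cases r <;> simp

lemma pyZipT_eq (d : List (List Int)) :
    pyZipT d = (List.range (minw d)).map (fun i => d.map (fun r => r.getD i 0)) := by
  fun_induction pyZipT d with
  | case1 d h =>
    rcases h with rfl | h
    · simp [minw]
    · obtain ⟨r, hr, hre⟩ := List.any_eq_true.mp h
      have h0 : minw d = 0 := Nat.le_zero.mp (by
        have := minw_le d r hr
        simp [List.isEmpty_iff.mp hre] at this ⊢
        omega)
      simp [h0]
  | case2 d h ih =>
    rw [not_or] at h
    obtain ⟨hne, hall⟩ := h
    have hrows : ∀ r ∈ d, r ≠ [] := by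
      intro r hr hrnil
      exact hall (List.any_eq_true.mpr ⟨r, hr, by simp [hrnil]⟩)
    have h1 : 1 ≤ minw d :=
      le_minw d 1 hne (fun r hr => List.length_pos_iff.mpr (hrows r hr))
    simp only [List.map_subtype, List.unattach_attach] at ih
    rw [ih, minw_tail d hne]
    have h2 : minw d = (minw d - 1) + 1 := by omega
    rw [h2, List.range_succ_eq_map, List.map_cons, List.map_map]
    congr 1
    · exact List.map_congr_left (fun r _ => by cases r <;> simp)
    · simp only [Nat.add_sub_cancel, List.map_map]
      refine List.map_congr_left (fun i _ => ?_)
      simp only [Function.comp_apply]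
      refine List.map_congr_left (fun r _ => ?_)
      simpa using getD_tail r i

lemma range_map_getD (l : List Int) (n : Nat) (h : l.length = n) :
    (List.range n).map (fun j => l.getD j 0) = l := by
  apply List.ext_getElem
  · simp [h]
  · intro i h1 h2
    simp only [List.getElem_map, List.getElem_range]
    exact List.getD_eq_getElem l 0 (by omega)

lemma foldl_const_iterate {α β : Type} (f : α → α) (l : List β) (x : α) :
    l.foldl (fun g _ => f g) x = f^[l.length] x := by
  induction l generalizing x with
  | nil => rfl
  | cons y ys ih => simp [ih, Function.iterate_succ_apply]

lemma step_map_range (a : Int) (sm : List Int) (w : Nat) (F : Nat → List Int) :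
    (PySem.List.enumerate ((List.range w).map F)).map
        (fun p => if p.1 == a then sm.map (fun i => PySem.List.pyGetD p.2 i 0) else p.2)
      = (List.range w).map
          (fun m => if ((m : Nat) : Int) == a then sm.map (fun i => PySem.List.pyGetD (F m) i 0) else F m) := by
  rw [PySem.List.enumerate_eq_map_pyRange _ []]
  simp only [PySem.List.len_eq, List.length_map, List.length_range,
    PySem.List.pyRange_zero_nat, List.map_map]
  refine List.map_congr_left (fun m hm => ?_)
  rw [List.mem_range] at hm
  simp only [Function.comp_apply, PySem.List.pyGetD_natCast,
    PySem.List.getD_map_range F w m [] hm]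

lemma rot_step (g : List Int) (e : Nat) (hg : g.length = e + 1) :
    ((e : Int) :: PySem.List.pyRange 0 (e : Int)).map (fun i => PySem.List.pyGetD g i 0)
      = (List.range (e + 1)).map (fun j => g.getD ((j + e) % (e + 1)) 0) := by
  rw [List.range_succ_eq_map, List.map_cons, List.map_cons, PySem.List.pyRange_zero_nat,
    List.map_map, List.map_map]
  congr 1
  · rw [PySem.List.pyGetD_natCast, Nat.zero_add, Nat.mod_eq_of_lt (Nat.lt_succ_self e)]
  · refine List.map_congr_left (fun j hj => ?_)
    rw [List.mem_range] at hj
    simp only [Function.comp_apply, PySem.List.pyGetD_natCast]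
    congr 1
    have : j + 1 + e = j + (e + 1) := by omega
    rw [this, Nat.add_mod_right, Nat.mod_eq_of_lt (by omega)]

lemma rotN_succ (c : List Int) (e k : Nat) :
    ((e : Int) :: PySem.List.pyRange 0 (e : Int)).map
        (fun i => PySem.List.pyGetD (pvRotN c (e + 1) k) i 0)
      = pvRotN c (e + 1) (k + 1) := by
  have hlen : (pvRotN c (e + 1) k).length = e + 1 := by simp [pvRotN]
  rw [rot_step _ e hlen]
  unfold pvRotN
  refine List.map_congr_left (fun j hj => ?_)
  rw [List.mem_range] at hj
  rw [PySem.List.getD_map_range _ (e + 1) ((j + e) % (e + 1)) 0 (Nat.mod_lt _ (by omega))]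
  congr 1
  simp only [Nat.add_sub_cancel]
  calc (j + e) % (e + 1) + e * k
      ≡ j + e + e * k [MOD e + 1] := Nat.ModEq.add_right _ (Nat.mod_modEq _ _)
    _ = j + e * (k + 1) := by ring

lemma rotN_zero (c : List Int) (e : Nat) (hc : c.length = e + 1) : pvRotN c (e + 1) 0 = c := by
  unfold pvRotN
  have h : ∀ j ∈ List.range (e + 1), c.getD ((j + (e + 1 - 1) * 0) % (e + 1)) 0 = c.getD j 0 := by
    intro j hj
    rw [List.mem_range] at hj
    simp [Nat.mod_eq_of_lt hj]
  rw [List.map_congr_left h, range_map_getD c (e + 1) hc]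

-- one iteration of A's loop body
def pvStep (a : Int) (sm : List Int) (g : List (List Int)) : List (List Int) :=
  (PySem.List.enumerate g).map
    (fun p => if p.1 == a then sm.map (fun i => PySem.List.pyGetD p.2 i 0) else p.2)

lemma pvStep_iter (d : List (List Int)) (a : Int) (e : Nat) (he : d.length = e + 1)
    (w k : Nat) :
    (pvStep a ((e : Int) :: PySem.List.pyRange 0 (e : Int)))^[k] ((List.range w).map (pvCol d))
      = (List.range w).map
          (fun m => if ((m : Nat) : Int) == a then pvRotN (pvCol d m) (e + 1) k else pvCol d m) := by
  have hcol_len : ∀ m, (pvCol d m).length = e + 1 := fun m => by simp [pvCol, he]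
  induction k with
  | zero =>
    simp only [Function.iterate_zero, id_eq]
    refine List.map_congr_left (fun m _ => ?_)
    by_cases hm : ((m : Nat) : Int) = a
    · simp [hm, rotN_zero (pvCol d m) e (hcol_len m)]
    · simp [hm]
  | succ k ih =>
    rw [Function.iterate_succ_apply', ih]
    unfold pvStep
    rw [step_map_range]
    refine List.map_congr_left (fun m _ => ?_)
    by_cases hm : ((m : Nat) : Int) = a
    · simp only [hm, beq_self_eq_true, if_true]
      exact rotN_succ (pvCol d m) e k
    · simp [hm]

-- the Int index B computes equals the Nat index A's rotation uses
-- (for 0 ≤ b, and for negative b whose shift b mod h is zero)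
lemma idx_eq (e k0 i : Nat) (b : Int) (hi : i < e + 1)
    (hyp : 0 ≤ b ∨ PySem.Int.mod b ((e : Int) + 1) = 0) (hk : k0 = b.toNat) :
    PySem.Int.mod ((i : Int) - PySem.Int.mod b ((e : Int) + 1)) ((e : Int) + 1)
      = (((i + e * k0) % (e + 1) : Nat) : Int) := by
  have hpos : (0 : Int) < (e : Int) + 1 := by positivity
  by_cases hb : 0 ≤ b
  · rw [PySem.Int.mod_eq_emod_of_pos hpos, PySem.Int.mod_eq_emod_of_pos hpos]
    have hbk : (k0 : Int) = b := by rw [hk]; exact Int.toNat_of_nonneg hb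
    push_cast [Int.natCast_mod]
    rw [← hbk]
    calc ((i : Int) - (k0 : Int) % ((e : Int) + 1)) % ((e : Int) + 1)
        = ((i : Int) - (k0 : Int)) % ((e : Int) + 1) := by
          rw [Int.sub_emod, Int.emod_emod_of_dvd _ dvd_rfl, ← Int.sub_emod]
      _ = ((i : Int) + (e : Int) * (k0 : Int)) % ((e : Int) + 1) := by
          rw [show (i : Int) + (e : Int) * (k0 : Int)
                = ((i : Int) - (k0 : Int)) + ((e : Int) + 1) * (k0 : Int) by ring,
              Int.add_mul_emod_self_left]
  · have hmod0 : PySem.Int.mod b ((e : Int) + 1) = 0 := hyp.resolve_left hb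
    have hk0 : k0 = 0 := by rw [hk]; exact Int.toNat_of_nonpos (le_of_not_ge hb)
    rw [hmod0, sub_zero, hk0, Nat.mul_zero, Nat.add_zero, Nat.mod_eq_of_lt hi,
        PySem.Int.mod_eq_emod_of_pos hpos]
    exact Int.emod_eq_of_lt (by positivity) (by exact_mod_cast hi)

lemma shift_eq (d : List (List Int)) (a b : Int) (hne : d ≠ [])
    (hrect : ∀ r ∈ d, r.length = (d.headD []).length) (hh : d.headD [] ≠ [])
    (hnb : 0 ≤ b ∨ PySem.Int.mod b (PySem.List.len d) = 0 ∨ a < 0 ∨ ((d.headD []).length : Int) ≤ a) :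
    shift_column d a b = shift_column_alt d a b := by
  obtain ⟨e, he⟩ : ∃ e, d.length = e + 1 :=
    ⟨d.length - 1, by have := List.length_pos_iff.mpr hne; omega⟩
  set w0 : Nat := (d.headD []).length with hw0def
  have hw0 : 1 ≤ w0 := List.length_pos_iff.mpr hh
  have hrows : ∀ r ∈ d, r ≠ [] := fun r hr hnil => by
    have := hrect r hr; rw [hnil] at this; simp at this; omega
  have hminw : minw d = w0 := by
    refine le_antisymm ?_ (le_minw d w0 hne (fun r hr => le_of_eq (hrect r hr).symm))
    obtain ⟨r, hr⟩ := List.exists_mem_of_ne_nil d hne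
    exact le_trans (minw_le d r hr) (le_of_eq (hrect r hr))
  have hcol_len : ∀ m, (pvCol d m).length = e + 1 := fun m => by simp [pvCol, he]
  set k : Nat := b.toNat with hkdef
  set sm : List Int := (e : Int) :: PySem.List.pyRange 0 (e : Int) with hsm
  -- the grid A's loop produces (transposed form)
  set G : List (List Int) :=
    (List.range w0).map
      (fun m => if ((m : Nat) : Int) == a then pvRotN (pvCol d m) (e + 1) k else pvCol d m)
    with hG
  have hGrow : ∀ r ∈ G, r.length = e + 1 := by
    intro r hr
    rw [hG] at hr
    obtain ⟨m, _, rfl⟩ := List.mem_map.mp hr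
    by_cases hm : ((m : Nat) : Int) = a
    · simp [hm, pvRotN]
    · simp [hm, hcol_len m]
  have hGne : G ≠ [] := by
    rw [hG]
    obtain ⟨v, hv⟩ : ∃ v, w0 = v + 1 := ⟨w0 - 1, by omega⟩
    rw [hv]
    simp [List.range_succ_eq_map]
  have hminwG : minw G = e + 1 := by
    refine le_antisymm ?_ (le_minw G (e + 1) hGne (fun r hr => le_of_eq (hGrow r hr).symm))
    obtain ⟨r, hr⟩ := List.exists_mem_of_ne_nil G hGne
    exact le_trans (minw_le G r hr) (le_of_eq (hGrow r hr))
  -- A's value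
  have hA : shift_column d a b
      = (List.range (e + 1)).map (fun i => (List.range w0).map
          (fun m => (if ((m : Nat) : Int) == a then pvRotN (pvCol d m) (e + 1) k
                     else pvCol d m).getD i 0)) := by
    simp only [shift_column]
    have ht0 : PySem.List.pyGetD (pyZipT d) 0 [] = pvCol d 0 := by
      rw [pyZipT_eq d, hminw]
      obtain ⟨v, hv⟩ : ∃ v, w0 = v + 1 := ⟨w0 - 1, by omega⟩
      rw [hv, List.range_succ_eq_map, List.map_cons, PySem.List.pyGetD_zero_cons]
      rfl
    have hn : PySem.List.len (PySem.List.pyGetD (pyZipT d) 0 []) = (e : Int) + 1 := by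
      rw [ht0, PySem.List.len_eq, hcol_len 0]
      push_cast
      ring
    have hpop : PySem.List.pop? (PySem.List.pyRange 0 ((e : Int) + 1))
        = some ((e : Int), PySem.List.pyRange 0 (e : Int)) := by
      rw [PySem.List.pyRange_one_succ_right (by positivity)]
      exact PySem.List.pop?_last _ _
    rw [hn]
    rw [hpop]
    simp only [PySem.List.insert_zero]
    rw [show (fun (g : List (List Int)) (_ : Int) => (PySem.List.enumerate g).map
          (fun p => if p.1 == a then sm.map (fun i => PySem.List.pyGetD p.2 i 0) else p.2))
        = (fun g _ => pvStep a sm g) from rfl]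
    rw [foldl_const_iterate (pvStep a sm)]
    rw [PySem.List.length_pyRange_one, sub_zero, ← hkdef]
    rw [pyZipT_eq d, hminw, hsm,
        show (fun i => List.map (fun r => r.getD i 0) d) = pvCol d from rfl,
        pvStep_iter d a e he w0 k, ← hG]
    rw [pyZipT_eq G, hminwG, hG]
    refine List.map_congr_left (fun i _ => ?_)
    rw [List.map_map]
    rfl
  -- B's value
  have hB : shift_column_alt d a b
      = (List.range d.length).map (fun i => (List.range w0).map (fun c =>
          if ((c : Nat) : Int) == a then
            PySem.List.pyGetD (PySem.List.pyGetD d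
              (PySem.Int.mod (((i : Nat) : Int) - PySem.Int.mod b ((d.length : Nat) : Int))
                ((d.length : Nat) : Int)) []) ((c : Nat) : Int) 0
          else (d.getD i []).getD c 0)) := by
    simp only [shift_column_alt]
    rw [PySem.List.enumerate_eq_map_pyRange d []]
    simp only [PySem.List.len_eq]
    rw [PySem.List.pyRange_zero_nat d.length]
    simp only [List.map_map]
    refine List.map_congr_left (fun i hi => ?_)
    rw [List.mem_range] at hi
    simp only [Function.comp_apply, PySem.List.pyGetD_natCast]
    rw [PySem.List.enumerate_eq_map_pyRange (d.getD i []) 0]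
    have hlen : (d.getD i []).length = w0 := by
      rw [List.getD_eq_getElem d [] hi]
      exact hrect _ (List.getElem_mem hi)
    simp only [PySem.List.len_eq, hlen]
    rw [PySem.List.pyRange_zero_nat w0]
    simp only [List.map_map]
    refine List.map_congr_left (fun c hc => ?_)
    rw [List.mem_range] at hc
    simp only [Function.comp_apply, PySem.List.pyGetD_natCast]
  rw [hA, hB, he]
  refine List.map_congr_left (fun i hi => ?_)
  rw [List.mem_range] at hi
  refine List.map_congr_left (fun c hc => ?_)
  rw [List.mem_range] at hc
  have hj : (i + e * k) % (e + 1) < e + 1 := Nat.mod_lt _ (by omega)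
  by_cases hca : ((c : Nat) : Int) = a
  · have hb' : (((c : Nat) : Int) == a) = true := beq_iff_eq.mpr hca
    have hyp : 0 ≤ b ∨ PySem.Int.mod b ((e : Int) + 1) = 0 := by
      rcases hnb with hbp | hm | ha | ha
      · exact Or.inl hbp
      · right
        rw [PySem.List.len_eq, he,
            show (((e + 1 : Nat)) : Int) = (e : Int) + 1 from by push_cast; ring] at hm
        exact hm
      · exact absurd hca (by omega)
      · exact absurd hca (by omega)
    rw [if_pos hb', if_pos hb',
        show (((e + 1 : Nat)) : Int) = (e : Int) + 1 from by push_cast; ring,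
        idx_eq e k i b hi hyp hkdef]
    unfold pvRotN
    rw [PySem.List.getD_map_range _ (e + 1) i 0 hi]
    simp only [Nat.add_sub_cancel]
    rw [PySem.List.pyGetD_natCast, PySem.List.pyGetD_natCast]
    unfold pvCol
    rw [List.getD_eq_getElem _ _ (by simpa [he] using hj), List.getElem_map,
        List.getD_eq_getElem _ _ (by omega : (i + e * k) % (e + 1) < d.length)]
  · have hb' : (((c : Nat) : Int) == a) = false := by simp [hca]
    rw [if_neg (by simp [hb']), if_neg (by simp [hb'])]
    unfold pvCol
    rw [List.getD_eq_getElem _ _ (by simp [he]; omega), List.getElem_map,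
        List.getD_eq_getElem _ _ (by omega : i < d.length)]

-- ===== VERDICT (by name: the statement is the Claim_ definition above) =====
theorem shift_column_spec : Claim_equal_shift_column := by
  intro d a b _ hpre
  exact shift_eq d a b hpre.1 hpre.2.1 hpre.2.2.1 hpre.2.2.2
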